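-- pv_equiv track=rewrite | github.com/op4804/Games | TextPoker/main.py | makeHand
-- ===== SOURCE A (Python) =====
-- def makeHand(cards:list):
--     clone = cards
--     hand_list = []
--     for i in range(len(cards)):
--         clone = cards.copy()
--         clone.pop(i)
--         for j in range(len(clone)):
--             cclone = clone.copy()
--             cclone.pop(j)
--             hand_list.append(cclone)
--
--     newlist = []
--     for i in range(len(hand_list)):
--         if hand_list[i] in newlist:
--             pass
--         else:
--             newlist.append(hand_list[i])
--     newlist.sort()
--     return newlist
-- ===== SOURCE B (Python) =====
-- def makeHand(cards: list):
--     n = len(cards)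
--     seen = set()
--     out = []
--     for i in range(n):
--         for j in range(i + 1, n):
--             rest = tuple(cards[k] for k in range(n) if k != i and k != j)
--             if rest not in seen:
--                 seen.add(rest)
--                 out.append(list(rest))
--     return sorted(out)
-- ===== Notes on version B (the rewrite author's own statement) =====
-- stated objective: faster
-- what changed: B enumerates each unordered pair of removed positions once (i < j) and builds the survivors by index filtering with set-based dedup, instead of A's pop-then-pop over every ordered pair followed by a quadratic membership-list dedup pass.
import Mathlib
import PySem

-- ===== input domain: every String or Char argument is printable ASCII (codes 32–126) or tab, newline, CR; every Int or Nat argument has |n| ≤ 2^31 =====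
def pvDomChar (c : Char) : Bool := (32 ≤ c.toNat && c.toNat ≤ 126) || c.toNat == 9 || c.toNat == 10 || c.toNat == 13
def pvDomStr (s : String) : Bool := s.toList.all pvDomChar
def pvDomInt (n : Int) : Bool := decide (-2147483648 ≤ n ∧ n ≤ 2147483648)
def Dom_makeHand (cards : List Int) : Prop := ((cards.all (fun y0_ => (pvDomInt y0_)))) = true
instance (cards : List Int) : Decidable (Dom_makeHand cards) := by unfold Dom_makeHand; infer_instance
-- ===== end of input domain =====

-- B enumerates each unordered pair of removed positions once (i < j) and dedups with a set,
-- instead of A's pop-twice enumeration (every pair in both orders) with a quadratic membership-list dedup.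

-- ===== PORT A =====
def makeHand (cards : List Int) : List (List Int) :=
  -- clone = cards (rebound inside the loop)
  let hand_list : List (List Int) :=
    (PySem.List.pyRange 0 (PySem.List.len cards) 1).foldl (fun hl i =>
      match PySem.List.pop? cards i with
      | some (_, clone) =>
          (PySem.List.pyRange 0 (PySem.List.len clone) 1).foldl (fun hl2 j =>
            match PySem.List.pop? clone j with
            | some (_, cclone) => hl2 ++ [cclone]
            | none => hl2) hl
      | none => hl) []
  let newlist : List (List Int) :=
    (PySem.List.pyRange 0 (PySem.List.len hand_list) 1).foldl (fun nl i =>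
      if nl.contains (PySem.List.pyGetD hand_list i []) then nl
      else nl ++ [PySem.List.pyGetD hand_list i []]) []
  PySem.List.sorted newlist (fun x => x) false

-- ===== PORT B =====
def makeHand_alt (cards : List Int) : List (List Int) :=
  let n : Int := PySem.List.len cards
  let st : PySem.Set (List Int) × List (List Int) :=
    (PySem.List.pyRange 0 n 1).foldl (fun st i =>
      (PySem.List.pyRange (i + 1) n 1).foldl (fun (st : PySem.Set (List Int) × List (List Int)) j =>
        let rest := ((PySem.List.pyRange 0 n 1).filter (fun k => k != i && k != j)).map
          (fun k => PySem.List.pyGetD cards k 0)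
        if st.1.contains rest then st else (st.1.add rest, st.2 ++ [rest])) st)
      (PySem.Set.empty, [])
  PySem.List.sorted st.2 (fun x => x) false

-- ===== PRECONDITION & SPEC =====
def Spec_makeHand (cards : List Int) (out : List (List Int)) : Prop := out = makeHand_alt cards
instance (cards : List Int) (out : List (List Int)) : Decidable (Spec_makeHand cards out) := by unfold Spec_makeHand; infer_instance

-- ===== CLAIM (what is proved, stated in full; the proofs are below) =====
def Claim_equal_makeHand : Prop := ∀ (cards : List Int), Dom_makeHand cards → Spec_makeHand cards (makeHand cards)

-- ===== LEMMAS AND PROOFS =====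

def pvRm2 (cards : List Int) (a b : Nat) : List Int := (cards.eraseIdx b).eraseIdx a
def pvLA (cards : List Int) : List (List Int) :=
  (List.range cards.length).flatMap (fun i =>
    (List.range (cards.length - 1)).map (fun j => (cards.eraseIdx i).eraseIdx j))
theorem pv_eraseIdx_comm (l : List Int) (i j : Nat) (h : i ≤ j) :
    (l.eraseIdx i).eraseIdx j = (l.eraseIdx (j + 1)).eraseIdx i := by
  induction l generalizing i j with
  | nil => simp [List.eraseIdx]
  | cons x t ih =>
    cases i with
    | zero => simp [List.eraseIdx]
    | succ i' =>
      cases j with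
      | zero => omega
      | succ j' => simp [List.eraseIdx]; exact ih i' j' (by omega)
theorem pv_mem_LA (cards : List Int) (x : List Int) :
    x ∈ pvLA cards ↔ ∃ a b : Nat, a < b ∧ b < cards.length ∧ x = pvRm2 cards a b := by
  unfold pvLA
  simp only [List.mem_flatMap, List.mem_map, List.mem_range]
  constructor
  · rintro ⟨i, hi, ⟨j, hj, rfl⟩⟩
    by_cases hji : j < i
    · exact ⟨j, i, hji, hi, rfl⟩
    · refine ⟨i, j + 1, by omega, by omega, ?_⟩
      rw [pvRm2, ← pv_eraseIdx_comm cards i j (by omega)]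
  · rintro ⟨a, b, hab, hb, rfl⟩
    refine ⟨a, by omega, b - 1, by omega, ?_⟩
    rw [pvRm2, pv_eraseIdx_comm cards a (b-1) (by omega)]
    congr 2; omega

theorem pv_map_seg (cards : List Int) : ∀ (d p : Nat), p + d ≤ cards.length →
    (PySem.List.pyRange (p : Int) ((p + d : Nat) : Int) 1).map (fun k => PySem.List.pyGetD cards k 0)
      = (cards.drop p).take d := by
  intro d
  induction d with
  | zero => intro p _; simp [PySem.List.pyRange_one_eq_nil]
  | succ d ih =>
    intro p hp
    rw [PySem.List.pyRange_one_cons (by push_cast; omega)]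
    rw [List.map_cons]
    have h1 : ((p : Int) + 1) = ((p + 1 : Nat) : Int) := by push_cast; ring
    have h2 : ((p + (d+1) : Nat) : Int) = (((p+1) + d : Nat) : Int) := by push_cast; ring
    rw [h1, h2, ih (p+1) (by omega)]
    rw [PySem.List.pyGetD_natCast]
    have hpl : p < cards.length := by omega
    rw [List.getD_eq_getElem _ _ hpl]
    rw [List.drop_eq_getElem_cons hpl, List.take_succ_cons]

theorem pv_rm2_seg (l : List Int) (a b : Nat) (hab : a < b) (hb : b < l.length) :
    (l.eraseIdx b).eraseIdx a
      = l.take a ++ (l.drop (a+1)).take (b - (a+1)) ++ l.drop (b+1) := by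
  rw [List.eraseIdx_eq_take_drop_succ, List.eraseIdx_eq_take_drop_succ]
  have hlen : (l.take b).length = b := by simp; omega
  rw [List.take_append_of_le_length (by omega)]
  rw [List.drop_append]
  rw [List.take_take, List.drop_take]
  have h0 : a + 1 - (l.take b).length = 0 := by omega
  rw [h0, List.drop_zero, Nat.min_eq_left (by omega : a ≤ b), List.append_assoc]

def pvRest (cards : List Int) (i j : Int) : List Int :=
  ((PySem.List.pyRange 0 (PySem.List.len cards) 1).filter (fun k => k != i && k != j)).map
    (fun k => PySem.List.pyGetD cards k 0)

theorem pv_map_seg' (cards : List Int) (p q : Nat) (h : q ≤ cards.length) :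
    (PySem.List.pyRange (p : Int) (q : Int) 1).map (fun k => PySem.List.pyGetD cards k 0)
      = (cards.drop p).take (q - p) := by
  rcases Nat.lt_or_ge q p with hpq | hpq
  · rw [PySem.List.pyRange_one_eq_nil (by exact_mod_cast hpq.le)]
    have h0 : q - p = 0 := by omega
    simp [h0]
  · have hseg := pv_map_seg cards (q - p) p (by omega)
    have hc : ((p + (q - p) : Nat) : Int) = (q : Int) := by push_cast; omega
    rw [hc] at hseg
    exact hseg

theorem pv_rest_eq (cards : List Int) (a b : Nat) (hab : a < b) (hb : b < cards.length) :
    pvRest cards (a : Int) (b : Int) = (cards.eraseIdx b).eraseIdx a := by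
  have hn : PySem.List.len cards = ((cards.length : Nat) : Int) := PySem.List.len_eq cards
  unfold pvRest
  rw [hn]
  rw [PySem.List.pyRange_one_append 0 (a : Int) (cards.length : Int) (by positivity) (by exact_mod_cast by omega)]
  rw [PySem.List.pyRange_one_append (a : Int) ((a : Int) + 1) (cards.length : Int) (by omega) (by exact_mod_cast by omega)]
  rw [PySem.List.pyRange_one_append ((a : Int) + 1) (b : Int) (cards.length : Int) (by exact_mod_cast by omega) (by exact_mod_cast by omega)]
  rw [PySem.List.pyRange_one_append (b : Int) ((b : Int) + 1) (cards.length : Int) (by omega) (by exact_mod_cast by omega)]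
  rw [PySem.List.pyRange_one_singleton, PySem.List.pyRange_one_singleton]
  rw [List.filter_append, List.filter_append, List.filter_append, List.filter_append]
  have hfa : ∀ (lo hi : Int), (∀ k, lo ≤ k → k < hi → k ≠ (a:Int) ∧ k ≠ (b:Int)) →
      (PySem.List.pyRange lo hi 1).filter (fun k => k != (a:Int) && k != (b:Int)) = PySem.List.pyRange lo hi 1 := by
    intro lo hi hk
    apply List.filter_eq_self.mpr
    intro k hkmem
    rw [PySem.List.mem_pyRange_one] at hkmem
    obtain ⟨h1, h2⟩ := hk k hkmem.1 hkmem.2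
    simp [h1, h2]
  rw [hfa 0 (a:Int) (by intro k h1 h2; constructor <;> omega)]
  rw [hfa ((a:Int)+1) (b:Int) (by intro k h1 h2; constructor <;> omega)]
  rw [hfa ((b:Int)+1) (cards.length : Int) (by intro k h1 h2; constructor <;> omega)]
  have hsa : ([(a:Int)].filter (fun k => k != (a:Int) && k != (b:Int))) = [] := by simp
  have hsb : ([(b:Int)].filter (fun k => k != (a:Int) && k != (b:Int))) = [] := by simp
  rw [hsa, hsb]
  simp only [List.nil_append, List.map_append]
  have e1 := pv_map_seg' cards 0 a (by omega)
  have e2 := pv_map_seg' cards (a+1) b (by omega)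
  have e3 := pv_map_seg' cards (b+1) cards.length (by omega)
  have c1 : ((0:Nat):Int) = (0:Int) := rfl
  have c2 : ((a+1:Nat):Int) = (a:Int)+1 := by push_cast; ring
  have c3 : ((b+1:Nat):Int) = (b:Int)+1 := by push_cast; ring
  rw [c1] at e1; rw [c2] at e2; rw [c3] at e3
  have e1' : List.map (fun k => PySem.List.pyGetD cards k 0) (PySem.List.pyRange 0 (a:Int)) = List.take a cards := by
    simpa using e1
  have e3' : List.take (cards.length - (b + 1)) (List.drop (b + 1) cards) = List.drop (b + 1) cards :=
    List.take_of_length_le (by simp)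
  rw [e1', e2, e3, e3', pv_rm2_seg cards a b hab hb, List.append_assoc]

def pvLB (cards : List Int) : List (List Int) :=
  (PySem.List.pyRange 0 (PySem.List.len cards) 1).flatMap (fun i =>
    (PySem.List.pyRange (i + 1) (PySem.List.len cards) 1).map (fun j => pvRest cards i j))

theorem pv_mem_LB (cards : List Int) (x : List Int) :
    x ∈ pvLB cards ↔ ∃ a b : Nat, a < b ∧ b < cards.length ∧ x = pvRm2 cards a b := by
  unfold pvLB
  simp only [List.mem_flatMap, List.mem_map, PySem.List.mem_pyRange_one, PySem.List.len_eq]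
  constructor
  · rintro ⟨i, ⟨hi0, hin⟩, ⟨j, ⟨hj1, hjn⟩, rfl⟩⟩
    refine ⟨i.toNat, j.toNat, by omega, by omega, ?_⟩
    rw [pvRm2, ← pv_rest_eq cards i.toNat j.toNat (by omega) (by omega)]
    congr 1 <;> omega
  · rintro ⟨a, b, hab, hb, rfl⟩
    exact ⟨(a : Int), ⟨by positivity, by exact_mod_cast by omega⟩,
      ⟨(b : Int), ⟨by exact_mod_cast by omega, by exact_mod_cast hb⟩,
        by rw [pv_rest_eq cards a b hab hb, pvRm2]⟩⟩


def pvStep (st : PySem.Set (List Int) × List (List Int)) (r : List Int) :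
    PySem.Set (List Int) × List (List Int) :=
  if st.1.contains r then st else (st.1.add r, st.2 ++ [r])

theorem pv_pair_foldl (L : List (List Int)) : ∀ (s : List (List Int)),
    L.foldl pvStep (s, s) = (L.foldl PySem.Set.add s, L.foldl PySem.Set.add s) := by
  induction L with
  | nil => intro s; rfl
  | cons r t ih =>
    intro s
    have hstep : List.foldl pvStep (s, s) (r :: t) = List.foldl pvStep (pvStep (s, s) r) t := rfl
    have hadd : List.foldl PySem.Set.add s (r :: t) = List.foldl PySem.Set.add (PySem.Set.add s r) t := rfl
    rw [hstep, hadd]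
    by_cases h : r ∈ s
    · have h1 : pvStep (s, s) r = (s, s) := by simp [pvStep, h]
      have h2 : PySem.Set.add s r = s := by simp [PySem.Set.add, h]
      rw [h1, h2]
      exact ih s
    · have h1 : pvStep (s, s) r = (s ++ [r], s ++ [r]) := by simp [pvStep, PySem.Set.add, h]
      have h2 : PySem.Set.add s r = s ++ [r] := by simp [PySem.Set.add, h]
      rw [h1, h2]
      exact ih (s ++ [r])

theorem pv_makeHand_alt_eq (cards : List Int) :
    makeHand_alt cards = PySem.List.sorted (PySem.List.dedup (pvLB cards)) (fun x => x) false := by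
  unfold makeHand_alt
  dsimp only
  have key :
      (PySem.List.pyRange 0 (PySem.List.len cards) 1).foldl (fun st i =>
        (PySem.List.pyRange (i + 1) (PySem.List.len cards) 1).foldl
          (fun (st : PySem.Set (List Int) × List (List Int)) j =>
            let rest := ((PySem.List.pyRange 0 (PySem.List.len cards) 1).filter
              (fun k => k != i && k != j)).map (fun k => PySem.List.pyGetD cards k 0)
            if st.1.contains rest then st else (st.1.add rest, st.2 ++ [rest])) st)
        (PySem.Set.empty, []) = (pvLB cards).foldl pvStep ([], []) := by
    rw [pvLB, List.foldl_flatMap]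
    congr 1
    funext acc x
    rw [List.foldl_map]
    rfl
  rw [key, pv_pair_foldl]
  rfl

theorem pv_makeHand_eq (cards : List Int) :
    makeHand cards = PySem.List.sorted (PySem.List.dedup (pvLA cards)) (fun x => x) false := by
  unfold makeHand
  have houter :
      (PySem.List.pyRange 0 (PySem.List.len cards) 1).foldl (fun hl i =>
        match PySem.List.pop? cards i with
        | some (_, clone) =>
            (PySem.List.pyRange 0 (PySem.List.len clone) 1).foldl (fun hl2 j =>
              match PySem.List.pop? clone j with
              | some (_, cclone) => hl2 ++ [cclone]
              | none => hl2) hl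
        | none => hl) [] = pvLA cards := by
    rw [PySem.List.len_eq cards, PySem.List.pyRange_zero_nat, List.foldl_map]
    rw [PySem.List.foldl_congr_mem _ _
      (fun hl (i : Nat) => hl ++ (List.range (cards.length - 1)).map
        (fun j => (cards.eraseIdx i).eraseIdx j)) []
      (by
        intro acc i hi
        rw [List.mem_range] at hi
        rw [PySem.List.pop?_natCast cards i hi]
        dsimp only
        have hlen : (cards.eraseIdx i).length = cards.length - 1 := by
          rw [List.length_eraseIdx]; simp [hi]
        rw [PySem.List.len_eq, hlen, PySem.List.pyRange_zero_nat, List.foldl_map]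
        rw [PySem.List.foldl_congr_mem _ _
          (fun hl2 (j : Nat) => hl2 ++ [(cards.eraseIdx i).eraseIdx j]) acc
          (by
            intro acc2 j hj
            rw [List.mem_range] at hj
            rw [PySem.List.pop?_natCast (cards.eraseIdx i) j (by omega)])]
        rw [PySem.List.foldl_append_singleton_eq_map])]
    rw [PySem.List.foldl_append_eq_flatMap, pvLA, List.nil_append]
  dsimp only
  rw [houter]
  congr 1
  rw [PySem.List.foldl_pyRange_zero_pyGetD (pvLA cards) []
    (fun nl x => if nl.contains x then nl else nl ++ [x]) []]
  rfl

-- ===== VERDICT (by name: the statement is the Claim_ definition above) =====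
theorem makeHand_spec : Claim_equal_makeHand := by
  intro cards _
  unfold Spec_makeHand
  rw [pv_makeHand_eq, pv_makeHand_alt_eq]
  have hperm : (PySem.List.dedup (pvLA cards)).Perm (PySem.List.dedup (pvLB cards)) := by
    rw [List.perm_ext_iff_of_nodup (PySem.List.nodup_dedup _) (PySem.List.nodup_dedup _)]
    intro a
    rw [PySem.List.mem_dedup, PySem.List.mem_dedup, pv_mem_LA, pv_mem_LB]
  have h := PySem.List.sorted_eq_sorted_of_perm _ _ (fun x => x) (fun _ _ h => h) hperm
  convert h using 2
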